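-- pv_equiv track=rewrite | github.com/hhssmm95/ProblemSolving | PythonPracitce/TCT/TCT_freeze_drinks.py | solution
-- ===== SOURCE A (Python) =====
-- dX = [0, 0, 1, -1]
--
-- dY = [1, -1, 0, 0]
--
-- def dfs(frame, index, visited):
--     pos = index
--     N = len(frame)
--     M = len(frame[0])
--
--     for i in range(4):
--         x = pos[1] + dX[i]
--         y = pos[0] + dY[i]
--
--         if(x >= M or x < 0) or (y >= N or y < 0):
--             continue
--
--         if frame[y][x] == 0 and not visited[y][x]:
--             visited[y][x] = True
--             dfs(frame, (y, x), visited)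
--
-- def solution(N, M, frame):
--     answer = 0
--     visited = [[False]*M for _ in range(N)]
--
--     for i in range(N):
--         for j in range(M):
--             if frame[i][j] == 0 and not visited[i][j]:
--                 answer+=1
--                 visited[i][j] = True
--                 dfs(frame, (i, j), visited)
--
--     return answer
-- ===== SOURCE B (Python) =====
-- def solution(N, M, frame):
--     # Iterative BFS over a coordinate set instead of recursive DFS over a boolean matrix.
--     count = 0
--     visited = set()
--     for i in range(N):
--         for j in range(M):
--             if frame[i][j] == 0 and (i, j) not in visited:
--                 count += 1
--                 visited.add((i, j))
--                 queue = [(i, j)]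
--                 head = 0
--                 while head < len(queue):
--                     y, x = queue[head]
--                     head += 1
--                     for ny, nx in ((y + 1, x), (y - 1, x), (y, x + 1), (y, x - 1)):
--                         if 0 <= ny < N and 0 <= nx < M and frame[ny][nx] == 0 and (ny, nx) not in visited:
--                             visited.add((ny, nx))
--                             queue.append((ny, nx))
--     return count
-- ===== Notes on version B (the rewrite author's own statement) =====
-- stated objective: alternative
-- what changed: Replaces A's recursive DFS flood fill over a preallocated N x M boolean visited matrix by an iterative queue-based (BFS) flood fill over a set of visited coordinate pairs, with bounds taken from the N/M parameters instead of len(frame)/len(frame[0]).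
import Mathlib
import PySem

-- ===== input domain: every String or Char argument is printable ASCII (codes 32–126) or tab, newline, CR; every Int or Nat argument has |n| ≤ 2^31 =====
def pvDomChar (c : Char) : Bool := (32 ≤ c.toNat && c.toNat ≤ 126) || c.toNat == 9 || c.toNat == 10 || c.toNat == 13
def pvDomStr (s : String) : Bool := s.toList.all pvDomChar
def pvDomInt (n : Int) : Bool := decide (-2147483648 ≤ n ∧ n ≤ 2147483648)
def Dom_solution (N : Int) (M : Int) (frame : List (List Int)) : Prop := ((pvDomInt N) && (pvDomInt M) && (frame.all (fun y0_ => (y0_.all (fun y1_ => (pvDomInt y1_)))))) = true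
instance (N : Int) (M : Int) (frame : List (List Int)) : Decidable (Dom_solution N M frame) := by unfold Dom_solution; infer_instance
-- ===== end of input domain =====

-- B replaces A's recursive DFS over a boolean visited matrix by an iterative queue
-- flood fill over a set of visited coordinates (objective: alternative decomposition).

-- ===== PORT A =====
def dX : List Int := [0, 0, 1, -1]
def dY : List Int := [1, -1, 0, 0]

-- frame[y][x] (only used at in-bounds nonnegative indices)
def cell (frame : List (List Int)) (y x : Int) : Int :=
  (frame.getD y.toNat []).getD x.toNat 1

-- visited[y][x] (only used at in-bounds nonnegative indices)
def vget (visited : List (List Bool)) (y x : Int) : Bool :=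
  (visited.getD y.toNat []).getD x.toNat false

-- visited[y][x] = True
def vset (visited : List (List Bool)) (y x : Int) : List (List Bool) :=
  visited.set y.toNat ((visited.getD y.toNat []).set x.toNat true)

-- literal port of A's dfs; fuel only makes the recursion total (it is never
-- exhausted when called with fuel > number of still-unvisited zero cells)
def dfsA : Nat → List (List Int) → Int × Int → List (List Bool) → List (List Bool)
  | 0, _, _, visited => visited
  | fuel+1, frame, pos, visited =>
    let Ni : Int := frame.length
    let Mi : Int := (frame.headD []).length
    (List.range 4).foldl (fun visited i =>
      let x := pos.2 + dX.getD i 0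
      let y := pos.1 + dY.getD i 0
      if (Mi ≤ x ∨ x < 0) ∨ (Ni ≤ y ∨ y < 0) then visited
      else if cell frame y x = 0 ∧ vget visited y x = false then
        dfsA fuel frame (y, x) (vset visited y x)
      else visited) visited

def solution (N : Int) (M : Int) (frame : List (List Int)) : Int :=
  let visited0 : List (List Bool) :=
    (List.range N.toNat).map (fun _ => List.replicate M.toNat false)
  let st := (List.range N.toNat).foldl (fun st (i : Nat) =>
    (List.range M.toNat).foldl (fun st (j : Nat) =>
      if cell frame (i : Int) (j : Int) = 0 ∧ vget st.2 (i : Int) (j : Int) = false then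
        (st.1 + 1, dfsA (N.toNat * M.toNat + 1) frame ((i : Int), (j : Int)) (vset st.2 (i : Int) (j : Int)))
      else st) st) (((0 : Int), visited0))
  st.1

-- ===== PORT B =====
def neighborsB (y x : Int) : List (Int × Int) := [(y+1, x), (y-1, x), (y, x+1), (y, x-1)]

-- the while-loop over the growing queue of Source B; fuel only makes it total (it is
-- never exhausted when called with fuel > queue length + unvisited zero cells)
def bfsB : Nat → Int → Int → List (List Int) → List (Int × Int) → PySem.Set (Int × Int) → PySem.Set (Int × Int)
  | 0, _, _, _, _, visited => visited
  | _+1, _, _, _, [], visited => visited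
  | fuel+1, N, M, frame, (y, x) :: rest, visited =>
    let st := (neighborsB y x).foldl
      (fun (st : PySem.Set (Int × Int) × List (Int × Int)) q =>
        if 0 ≤ q.1 ∧ q.1 < N ∧ 0 ≤ q.2 ∧ q.2 < M ∧ cell frame q.1 q.2 = 0 ∧ ¬ st.1.contains q then
          (st.1.add q, st.2 ++ [q])
        else st) (visited, rest)
    bfsB fuel N M frame st.2 st.1

def solution_alt (N : Int) (M : Int) (frame : List (List Int)) : Int :=
  let st := (List.range N.toNat).foldl (fun st (i : Nat) =>
    (List.range M.toNat).foldl (fun (st : Int × PySem.Set (Int × Int)) (j : Nat) =>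
      let p : Int × Int := ((i : Int), (j : Int))
      if cell frame p.1 p.2 = 0 ∧ ¬ st.2.contains p then
        (st.1 + 1, bfsB (N.toNat * M.toNat + 1) N M frame [p] (st.2.add p))
      else st) st) (((0 : Int), PySem.Set.empty))
  st.1

-- ===== PRECONDITION & SPEC =====
abbrev InB (N M : Int) (p : Int × Int) : Prop := 0 ≤ p.1 ∧ p.1 < N ∧ 0 ≤ p.2 ∧ p.2 < M

-- Pre_ is exactly the set of inputs on which A returns: the scanned N x M window must be
-- readable (otherwise the scan raises IndexError), and no zero cell of the window may have
-- a neighbour that dfs can reach outside the window (dfs bounds come from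
-- len(frame)/len(frame[0]), not N/M) that is unreadable or holds a zero — on such inputs
-- A raises IndexError on frame[y][x] or visited[y][x].
def Pre_solution (N : Int) (M : Int) (frame : List (List Int)) : Prop :=
  (0 < M → N ≤ (frame.length : Int)) ∧
  (∀ row ∈ frame.take N.toNat, M ≤ (row.length : Int)) ∧
  (∀ i ∈ List.range (min N.toNat frame.length), ∀ j ∈ List.range M.toNat,
     cell frame (i : Int) (j : Int) = 0 →
     ∀ q ∈ neighborsB (i : Int) (j : Int),
       (0 ≤ q.1 ∧ q.1 < (frame.length : Int) ∧ 0 ≤ q.2 ∧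
        q.2 < ((frame.headD []).length : Int) ∧ ¬ InB N M q) →
       (q.2 < ((frame.getD q.1.toNat []).length : Int) ∧ cell frame q.1 q.2 ≠ 0))
instance (N : Int) (M : Int) (frame : List (List Int)) : Decidable (Pre_solution N M frame) := by
  unfold Pre_solution; infer_instance

def pvWitness_solution : Int × Int × List (List Int) := (3, 3, [[0, 1, 0], [0, 1, 1], [1, 1, 0]])

def Spec_solution (N : Int) (M : Int) (frame : List (List Int)) (out : Int) : Prop := out = solution_alt N M frame
instance (N : Int) (M : Int) (frame : List (List Int)) (out : Int) : Decidable (Spec_solution N M frame out) := by unfold Spec_solution; infer_instance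

-- ===== CLAIM (what is proved, stated in full; the proofs are below) =====
def Claim_equal_solution : Prop := ∀ (N : Int) (M : Int) (frame : List (List Int)), Dom_solution N M frame → Pre_solution N M frame → Spec_solution N M frame (solution N M frame)

-- ===== LEMMAS AND PROOFS =====

-- abstract geometry
def ZeroC (N M : Int) (frame : List (List Int)) (p : Int × Int) : Prop :=
  InB N M p ∧ cell frame p.1 p.2 = 0

def Step (N M : Int) (frame : List (List Int)) (p q : Int × Int) : Prop :=
  q ∈ neighborsB p.1 p.2 ∧ ZeroC N M frame q

def Reach (N M : Int) (frame : List (List Int)) (s p : Int × Int) : Prop :=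
  Relation.ReflTransGen (Step N M frame) s p

-- visited-matrix dimensions
def Dims (N M : Int) (v : List (List Bool)) : Prop :=
  v.length = N.toNat ∧ ∀ r ∈ v, r.length = M.toNat

-- number of zero cells not yet marked by V
def uz (N M : Int) (frame : List (List Int)) (V : Int × Int → Bool) : Nat :=
  ((Finset.range N.toNat ×ˢ Finset.range M.toNat).filter
     (fun q => cell frame (q.1 : Int) (q.2 : Int) = 0 ∧ V ((q.1 : Int), (q.2 : Int)) = false)).card

theorem uz_le (N M : Int) (frame : List (List Int)) (V : Int × Int → Bool) :
    uz N M frame V ≤ N.toNat * M.toNat := by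
  have h := Finset.card_filter_le (Finset.range N.toNat ×ˢ Finset.range M.toNat)
    (fun q => cell frame (q.1 : Int) (q.2 : Int) = 0 ∧ V ((q.1 : Int), (q.2 : Int)) = false)
  simpa [uz, Finset.card_product] using h

theorem uz_mono (N M : Int) (frame : List (List Int)) (V V' : Int × Int → Bool)
    (h : ∀ p, InB N M p → V p = true → V' p = true) : uz N M frame V' ≤ uz N M frame V := by
  apply Finset.card_le_card
  intro q hq
  simp only [Finset.mem_filter, Finset.mem_product, Finset.mem_range] at hq ⊢
  refine ⟨hq.1, hq.2.1, ?_⟩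
  have hin : InB N M ((q.1 : Int), (q.2 : Int)) := by
    obtain ⟨⟨h1, h2⟩, _⟩ := hq
    exact ⟨by omega, by omega, by omega, by omega⟩
  cases hV : V ((q.1 : Int), (q.2 : Int)) with
  | false => rfl
  | true => exact absurd (h _ hin hV) (by simp [hq.2.2])

theorem uz_lt (N M : Int) (frame : List (List Int)) (V V' : Int × Int → Bool) (p : Int × Int)
    (hp : InB N M p) (hz : cell frame p.1 p.2 = 0) (hold : V p = false) (hnew : V' p = true)
    (h : ∀ q, InB N M q → V q = true → V' q = true) : uz N M frame V' < uz N M frame V := by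
  apply Finset.card_lt_card
  constructor
  · intro q hq
    simp only [Finset.mem_filter, Finset.mem_product, Finset.mem_range] at hq ⊢
    refine ⟨hq.1, hq.2.1, ?_⟩
    have hin : InB N M ((q.1 : Int), (q.2 : Int)) := by
      obtain ⟨⟨h1, h2⟩, _⟩ := hq
      exact ⟨by omega, by omega, by omega, by omega⟩
    cases hV : V ((q.1 : Int), (q.2 : Int)) with
    | false => rfl
    | true => exact absurd (h _ hin hV) (by simp [hq.2.2])
  · intro hsub
    obtain ⟨h1, h2, h3, h4⟩ := hp
    have hmem : (p.1.toNat, p.2.toNat) ∈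
        (Finset.range N.toNat ×ˢ Finset.range M.toNat).filter
          (fun q => cell frame (q.1 : Int) (q.2 : Int) = 0 ∧ V ((q.1 : Int), (q.2 : Int)) = false) := by
      simp only [Finset.mem_filter, Finset.mem_product, Finset.mem_range]
      have e1 : ((p.1.toNat : Int)) = p.1 := Int.toNat_of_nonneg h1
      have e2 : ((p.2.toNat : Int)) = p.2 := Int.toNat_of_nonneg h3
      refine ⟨⟨by omega, by omega⟩, ?_, ?_⟩ <;> simp only [e1, e2]
      · exact hz
      · simpa using hold
    have := hsub hmem
    simp only [Finset.mem_filter] at this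
    have e1 : ((p.1.toNat : Int)) = p.1 := Int.toNat_of_nonneg h1
    have e2 : ((p.2.toNat : Int)) = p.2 := Int.toNat_of_nonneg h3
    rw [e1, e2] at this
    rw [this.2.2] at hnew
    exact Bool.false_ne_true hnew

-- matrix lemmas
theorem dims_vset (N M : Int) (v : List (List Bool)) (y x : Int)
    (hd : Dims N M v) : Dims N M (vset v y x) := by
  obtain ⟨hl, hr⟩ := hd
  rcases Nat.lt_or_ge y.toNat v.length with hy | hy
  · refine ⟨by simpa [vset] using hl, ?_⟩
    intro r hr'
    rcases List.mem_or_eq_of_mem_set hr' with h | h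
    · exact hr r h
    · subst h
      rw [List.length_set]
      have : v.getD y.toNat [] = v[y.toNat] := List.getD_eq_getElem v [] hy
      rw [this]
      exact hr _ (List.getElem_mem hy)
  · rw [vset, List.set_eq_of_length_le hy]
    exact ⟨hl, hr⟩

theorem vget_vset (N M : Int) (v : List (List Bool)) (y x y' x' : Int)
    (hd : Dims N M v) (hp : InB N M (y, x)) (hq : InB N M (y', x')) :
    vget (vset v y x) y' x' = if y' = y ∧ x' = x then true else vget v y' x' := by
  obtain ⟨hy0, hyN, hx0, hxM⟩ : 0 ≤ y ∧ y < N ∧ 0 ≤ x ∧ x < M := hp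
  obtain ⟨hy0', hyN', hx0', hxM'⟩ : 0 ≤ y' ∧ y' < N ∧ 0 ≤ x' ∧ x' < M := hq
  obtain ⟨hl, hr⟩ := hd
  have hylt : y.toNat < v.length := by omega
  have hylt' : y'.toNat < v.length := by omega
  have hrowlen : (v.getD y.toNat []).length = M.toNat := by
    rw [List.getD_eq_getElem v [] hylt]; exact hr _ (List.getElem_mem hylt)
  have hxlt : x.toNat < (v.getD y.toNat []).length := by omega
  by_cases hyy : y' = y
  · subst hyy
    have hrow : (vset v y' x).getD y'.toNat [] = (v.getD y'.toNat []).set x.toNat true := by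
      rw [vset, List.getD_eq_getElem?_getD, List.getElem?_set]
      simp [hylt, List.getD_eq_getElem?_getD]
    by_cases hxx : x' = x
    · subst hxx
      rw [vget, hrow, List.getD_eq_getElem?_getD, List.getElem?_set]
      rw [List.getD_eq_getElem?_getD] at hxlt
      simp [hxlt]
    · have hxne : x.toNat ≠ x'.toNat := by omega
      rw [if_neg (by simp [hxx])]
      rw [vget, hrow, List.getD_eq_getElem?_getD, List.getElem?_set, if_neg hxne,
        ← List.getD_eq_getElem?_getD, ← vget]
  · have hyne : y.toNat ≠ y'.toNat := by omega
    have hrow : (vset v y x).getD y'.toNat [] = v.getD y'.toNat [] := by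
      rw [vset, List.getD_eq_getElem?_getD, List.getElem?_set, if_neg hyne,
        ← List.getD_eq_getElem?_getD]
    rw [if_neg (by simp [hyy])]
    rw [vget, hrow, ← vget]

theorem vget_vset_self (N M : Int) (v : List (List Bool)) (y x : Int)
    (hd : Dims N M v) (hp : InB N M (y, x)) : vget (vset v y x) y x = true := by
  rw [vget_vset N M v y x y x hd hp hp]; simp

theorem vget_vset_mono (N M : Int) (v : List (List Bool)) (y x y' x' : Int)
    (hd : Dims N M v) (hp : InB N M (y, x)) (hq : InB N M (y', x'))
    (h : vget v y' x' = true) : vget (vset v y x) y' x' = true := by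
  rw [vget_vset N M v y x y' x' hd hp hq]; split <;> simp [h]

-- the A-side flood-fill postcondition bundle
def PostA (N M : Int) (frame : List (List Int)) (pos : Int × Int)
    (visited R : List (List Bool)) : Prop :=
  Dims N M R ∧
  (∀ p : Int × Int, InB N M p → vget visited p.1 p.2 = true → vget R p.1 p.2 = true) ∧
  (∀ p : Int × Int, InB N M p → vget R p.1 p.2 = true →
     vget visited p.1 p.2 = true ∨ Reach N M frame pos p) ∧
  (∀ p : Int × Int, InB N M p → vget R p.1 p.2 = true → ZeroC N M frame p) ∧
  (∀ q : Int × Int, Step N M frame pos q → vget R q.1 q.2 = true) ∧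
  (∀ p : Int × Int, InB N M p → vget R p.1 p.2 = true → vget visited p.1 p.2 = false →
     ∀ q : Int × Int, Step N M frame p q → vget R q.1 q.2 = true)

-- the hypotheses under which a dfs call is entered
def HypA (N M : Int) (frame : List (List Int)) (pos : Int × Int)
    (visited : List (List Bool)) : Prop :=
  ZeroC N M frame pos ∧ vget visited pos.1 pos.2 = true ∧ Dims N M visited ∧
  (∀ p : Int × Int, InB N M p → vget visited p.1 p.2 = true → ZeroC N M frame p)

-- PostA without the processed-neighbours component (holds after a partial loop)
def PostF (N M : Int) (frame : List (List Int)) (pos : Int × Int)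
    (visited R : List (List Bool)) : Prop :=
  Dims N M R ∧
  (∀ p : Int × Int, InB N M p → vget visited p.1 p.2 = true → vget R p.1 p.2 = true) ∧
  (∀ p : Int × Int, InB N M p → vget R p.1 p.2 = true →
     vget visited p.1 p.2 = true ∨ Reach N M frame pos p) ∧
  (∀ p : Int × Int, InB N M p → vget R p.1 p.2 = true → ZeroC N M frame p) ∧
  (∀ p : Int × Int, InB N M p → vget R p.1 p.2 = true → vget visited p.1 p.2 = false →
     ∀ q : Int × Int, Step N M frame p q → vget R q.1 q.2 = true)

-- the loop body of dfsA, named for the proofs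
def dfsBody (fuel : Nat) (frame : List (List Int)) (pos : Int × Int)
    (visited : List (List Bool)) (i : Nat) : List (List Bool) :=
  let x := pos.2 + dX.getD i 0
  let y := pos.1 + dY.getD i 0
  if (((frame.headD []).length : Int) ≤ x ∨ x < 0) ∨ ((frame.length : Int) ≤ y ∨ y < 0) then
    visited
  else if cell frame y x = 0 ∧ vget visited y x = false then
    dfsA fuel frame (y, x) (vset visited y x)
  else visited

theorem dfsA_succ (fuel : Nat) (frame : List (List Int)) (pos : Int × Int)
    (visited : List (List Bool)) :
    dfsA (fuel + 1) frame pos visited =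
      (List.range 4).foldl (dfsBody fuel frame pos) visited := rfl

theorem frame_len (N M : Int) (frame : List (List Int)) (hpre : Pre_solution N M frame)
    (hM : 0 < M) : N ≤ (frame.length : Int) := hpre.1 hM

theorem frame_row (N M : Int) (frame : List (List Int)) (hpre : Pre_solution N M frame)
    (hN : 0 < N) (hM : 0 < M) : M ≤ ((frame.headD []).length : Int) := by
  cases frame with
  | nil =>
    have := hpre.1 hM
    simp at this
    omega
  | cons r t =>
    refine hpre.2.1 r ?_
    have : N.toNat = (N.toNat - 1) + 1 := by omega
    rw [this, List.take_succ_cons]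
    simp

theorem dfsFold (N M : Int) (frame : List (List Int)) (hpre : Pre_solution N M frame)
    (fuel : Nat)
    (IH : ∀ (pos : Int × Int) (visited : List (List Bool)),
      HypA N M frame pos visited →
      uz N M frame (fun p => vget visited p.1 p.2) < fuel →
      PostA N M frame pos visited (dfsA fuel frame pos visited)) :
    ∀ (dirs : List Nat) (pos : Int × Int) (visited : List (List Bool)),
      (∀ i ∈ dirs, i < 4) →
      HypA N M frame pos visited →
      uz N M frame (fun p => vget visited p.1 p.2) ≤ fuel →
      (let R := dirs.foldl (dfsBody fuel frame pos) visited
       PostF N M frame pos visited R ∧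
       (∀ i ∈ dirs, ∀ q : Int × Int,
          q = (pos.1 + dY.getD i 0, pos.2 + dX.getD i 0) →
          Step N M frame pos q → vget R q.1 q.2 = true) ∧
       uz N M frame (fun p => vget R p.1 p.2) ≤
         uz N M frame (fun p => vget visited p.1 p.2)) := by
  intro dirs
  induction dirs with
  | nil =>
    intro pos visited _ hyp _
    refine ⟨⟨hyp.2.2.1, fun p _ h => h, fun p _ h => Or.inl h, hyp.2.2.2, ?_⟩, ?_, le_refl _⟩
    · intro p _ h1 h2
      simp only [List.foldl_nil] at h1
      rw [h1] at h2; exact absurd h2 (by simp)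
    · intro i hi; exact absurd hi (by simp)
  | cons i dirs ihd =>
    intro pos visited hlt hyp hfuel
    obtain ⟨hzpos, hmkpos, hdims, hsub⟩ := hyp
    have hN : 0 < N := by
      obtain ⟨⟨_, h2, _, _⟩, _⟩ := hzpos
      omega
    have hM : 0 < M := by
      obtain ⟨⟨_, _, _, h4⟩, _⟩ := hzpos
      omega
    have hMi : M ≤ ((frame.headD []).length : Int) := frame_row N M frame hpre hN hM
    have hNi : N ≤ (frame.length : Int) := frame_len N M frame hpre hM
    have hi4 : i < 4 := hlt i (by simp)
    simp only [List.foldl_cons]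
    set x := pos.2 + dX.getD i 0 with hx
    set y := pos.1 + dY.getD i 0 with hy
    have hnbr : ((y, x) : Int × Int) ∈ neighborsB pos.1 pos.2 := by
      interval_cases i <;> simp [neighborsB, hx, hy, dX, dY] <;> omega
    by_cases hskip : (((frame.headD []).length : Int) ≤ x ∨ x < 0) ∨ ((frame.length : Int) ≤ y ∨ y < 0)
    · -- out of bounds: the body is the identity
      have hbody : dfsBody fuel frame pos visited i = visited := by
        rw [dfsBody, if_pos hskip]
      rw [hbody]
      obtain ⟨post, hdirs, huz⟩ :=
        ihd pos visited (fun k hk => hlt k (by simp [hk])) ⟨hzpos, hmkpos, hdims, hsub⟩ hfuel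
      refine ⟨post, ?_, huz⟩
      intro k hk q hqeq hqstep
      rcases List.mem_cons.mp hk with rfl | hk'
      · -- this direction is out of bounds, so Step pos q is impossible
        exfalso
        obtain ⟨_, ⟨h1, h2, h3, h4⟩, _⟩ := hqstep
        rw [hqeq] at *
        simp only at h1 h2 h3 h4
        omega
      · exact hdirs k hk' q hqeq hqstep
    · simp only [not_or, not_le, not_lt] at hskip
      obtain ⟨⟨hxu, hxl⟩, hyu, hyl⟩ := hskip
      have hskip' : ¬ ((((frame.headD []).length : Int) ≤ x ∨ x < 0) ∨
          ((frame.length : Int) ≤ y ∨ y < 0)) := by omega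
      by_cases hcond : cell frame y x = 0 ∧ vget visited y x = false
      · -- recurse into the neighbour
        have hbody : dfsBody fuel frame pos visited i =
            dfsA fuel frame (y, x) (vset visited y x) := by
          rw [dfsBody, if_neg hskip', if_pos hcond]
        rw [hbody]
        -- the recursion target must lie inside the N x M window: otherwise the
        -- precondition's third clause contradicts cell frame y x = 0
        have hinb : InB N M ((y, x) : Int × Int) := by
          by_contra hnot
          obtain ⟨⟨hp1, hp2, hp3, hp4⟩, hpz⟩ := hzpos
          have e1 : ((pos.1.toNat : Int)) = pos.1 := Int.toNat_of_nonneg hp1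
          have e2 : ((pos.2.toNat : Int)) = pos.2 := Int.toNat_of_nonneg hp3
          have h3 := hpre.2.2 pos.1.toNat (List.mem_range.mpr (by omega))
            pos.2.toNat (List.mem_range.mpr (by omega))
            (by rw [e1, e2]; exact hpz) ((y, x) : Int × Int)
            (by rw [e1, e2]; exact hnbr) ⟨by omega, by omega, by omega, by omega, hnot⟩
          exact h3.2 hcond.1
        have hzq : ZeroC N M frame ((y, x) : Int × Int) := ⟨hinb, hcond.1⟩
        have hstepq : Step N M frame pos (y, x) := ⟨hnbr, hzq⟩
        -- the freshly marked matrix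
        have hdims' : Dims N M (vset visited y x) := dims_vset N M visited y x hdims
        have hmono0 : ∀ p : Int × Int, InB N M p → vget visited p.1 p.2 = true →
            vget (vset visited y x) p.1 p.2 = true := by
          intro p hp h
          exact vget_vset_mono N M visited y x p.1 p.2 hdims hinb hp h
        have hself : vget (vset visited y x) y x = true :=
          vget_vset_self N M visited y x hdims hinb
        have hsub' : ∀ p : Int × Int, InB N M p → vget (vset visited y x) p.1 p.2 = true →
            ZeroC N M frame p := by
          intro p hp h
          rw [vget_vset N M visited y x p.1 p.2 hdims hinb hp] at h
          split at h
          · next he => have : p = (y, x) := Prod.ext he.1 he.2; rw [this]; exact hzq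
          · exact hsub p hp h
        have huzlt : uz N M frame (fun p => vget (vset visited y x) p.1 p.2) <
            uz N M frame (fun p => vget visited p.1 p.2) :=
          uz_lt N M frame _ _ ((y, x) : Int × Int) hinb hcond.1 hcond.2 hself
            (fun q hq h => vget_vset_mono N M visited y x q.1 q.2 hdims hinb hq h)
        have hcall := IH ((y, x) : Int × Int) (vset visited y x)
          ⟨hzq, hself, hdims', hsub'⟩ (by omega)
        obtain ⟨cdims, cmono, csound, csub, cstep, cclosed⟩ := hcall
        set R1 := dfsA fuel frame ((y, x) : Int × Int) (vset visited y x) with hR1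
        have huzR1 : uz N M frame (fun p => vget R1 p.1 p.2) ≤
            uz N M frame (fun p => vget visited p.1 p.2) := by
          have := uz_mono N M frame _ _ cmono
          omega
        have hmk1 : vget R1 pos.1 pos.2 = true :=
          cmono pos hzpos.1 (hmono0 pos hzpos.1 hmkpos)
        obtain ⟨⟨pdims, pmono, psound, psub, pclosed⟩, hdirs, huz2⟩ :=
          ihd pos R1 (fun k hk => hlt k (by simp [hk]))
            ⟨hzpos, hmk1, cdims, csub⟩ (by omega)
        set R := dirs.foldl (dfsBody fuel frame pos) R1 with hR
        -- combined monotonicity from visited to R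
        have hmono : ∀ p : Int × Int, InB N M p → vget visited p.1 p.2 = true →
            vget R p.1 p.2 = true :=
          fun p hp h => pmono p hp (cmono p hp (hmono0 p hp h))
        have hmono1 : ∀ p : Int × Int, InB N M p → vget R1 p.1 p.2 = true →
            vget R p.1 p.2 = true := pmono
        refine ⟨⟨pdims, hmono, ?_, psub, ?_⟩, ?_, by omega⟩
        · -- soundness
          intro p hp h
          rcases psound p hp h with h1 | h1
          · rcases csound p hp h1 with h2 | h2
            · rw [vget_vset N M visited y x p.1 p.2 hdims hinb hp] at h2
              split at h2
              · next he =>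
                have : p = (y, x) := Prod.ext he.1 he.2
                exact Or.inr (this ▸ Relation.ReflTransGen.single hstepq)
              · exact Or.inl h2
            · exact Or.inr (Relation.ReflTransGen.head hstepq h2)
          · exact Or.inr h1
        · -- newly marked cells are closed
          intro p hp h hold q hq
          cases h1 : vget R1 p.1 p.2 with
          | true =>
            cases h2 : vget (vset visited y x) p.1 p.2 with
            | true =>
              rw [vget_vset N M visited y x p.1 p.2 hdims hinb hp] at h2
              split at h2
              · next he =>
                have hpq : p = (y, x) := Prod.ext he.1 he.2
                subst hpq
                exact hmono1 q hq.2.1 (by exact cstep q hq)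
              · rw [h2] at hold; exact absurd hold (by simp)
            | false =>
              exact hmono1 q hq.2.1 (cclosed p hp h1 h2 q hq)
          | false =>
            exact pclosed p hp h h1 q hq
        · -- the processed directions
          intro k hk q hqeq hqstep
          rcases List.mem_cons.mp hk with rfl | hk'
          · have hqyx : q = ((y, x) : Int × Int) := by rw [hqeq]
            subst hqyx
            exact hmono1 _ hinb (cmono _ hinb hself)
          · exact hdirs k hk' q hqeq hqstep
      · -- already visited or not a zero cell: the body is the identity
        have hbody : dfsBody fuel frame pos visited i = visited := by
          rw [dfsBody, if_neg hskip', if_neg hcond]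
        rw [hbody]
        obtain ⟨post, hdirs, huz⟩ :=
          ihd pos visited (fun k hk => hlt k (by simp [hk])) ⟨hzpos, hmkpos, hdims, hsub⟩ hfuel
        refine ⟨post, ?_, huz⟩
        intro k hk q hqeq hqstep
        rcases List.mem_cons.mp hk with rfl | hk'
        · -- the neighbour is already marked (it is a zero cell)
          have hqyx : q = ((y, x) : Int × Int) := by
            rw [hqeq]
          subst hqyx
          have hz : cell frame y x = 0 := hqstep.2.2
          have hv : vget visited y x = true := by
            by_contra hvf
            exact hcond ⟨hz, by simpa using hvf⟩
          exact post.2.1 ((y, x) : Int × Int) hqstep.2.1 hv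
        · exact hdirs k hk' q hqeq hqstep

theorem dfsA_post (N M : Int) (frame : List (List Int))
    (hpre : Pre_solution N M frame) :
    ∀ fuel (pos : Int × Int) (visited : List (List Bool)),
      HypA N M frame pos visited →
      uz N M frame (fun p => vget visited p.1 p.2) < fuel →
      PostA N M frame pos visited (dfsA fuel frame pos visited) := by
  intro fuel
  induction fuel with
  | zero => intro pos visited _ hf; exact absurd hf (by omega)
  | succ fuel ih =>
    intro pos visited hyp hf
    rw [dfsA_succ]
    obtain ⟨post, hdirs, _⟩ :=
      dfsFold N M frame hpre fuel ih (List.range 4) pos visited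
        (fun i hi => List.mem_range.mp hi) hyp (by omega)
    obtain ⟨pdims, pmono, psound, psub, pclosed⟩ := post
    refine ⟨pdims, pmono, psound, psub, ?_, pclosed⟩
    intro q hq
    have hmem := hq.1
    simp only [neighborsB, List.mem_cons, List.not_mem_nil, or_false] at hmem
    rcases hmem with h | h | h | h
    · exact hdirs 0 (by simp) q (by rw [h]; simp [dX, dY]) hq
    · exact hdirs 1 (by simp) q (by rw [h]; simp [dX, dY]; omega) hq
    · exact hdirs 2 (by simp) q (by rw [h]; simp [dX, dY]) hq
    · exact hdirs 3 (by simp) q (by rw [h]; simp [dX, dY]; omega) hq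

-- the B-side neighbour fold, named for the proofs
def bfsPush (N M : Int) (frame : List (List Int))
    (st : PySem.Set (Int × Int) × List (Int × Int)) (q : Int × Int) :
    PySem.Set (Int × Int) × List (Int × Int) :=
  if 0 ≤ q.1 ∧ q.1 < N ∧ 0 ≤ q.2 ∧ q.2 < M ∧ cell frame q.1 q.2 = 0 ∧ ¬ st.1.contains q then
    (st.1.add q, st.2 ++ [q])
  else st

theorem bfsB_succ (fuel : Nat) (N M : Int) (frame : List (List Int)) (y x : Int)
    (rest : List (Int × Int)) (visited : PySem.Set (Int × Int)) :
    bfsB (fuel + 1) N M frame ((y, x) :: rest) visited =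
      bfsB fuel N M frame ((neighborsB y x).foldl (bfsPush N M frame) (visited, rest)).2
        ((neighborsB y x).foldl (bfsPush N M frame) (visited, rest)).1 := rfl

theorem bfsPush_fold (N M : Int) (frame : List (List Int)) :
    ∀ (qs : List (Int × Int)) (V : PySem.Set (Int × Int)) (acc : List (Int × Int)),
      (∀ p : Int × Int,
         p ∈ (qs.foldl (bfsPush N M frame) (V, acc)).1 ↔
           p ∈ V ∨ (p ∈ qs ∧ ZeroC N M frame p)) ∧
      (∀ p : Int × Int, p ∈ (qs.foldl (bfsPush N M frame) (V, acc)).2 →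
         p ∈ acc ∨ (p ∈ qs ∧ ZeroC N M frame p)) ∧
      (∀ p : Int × Int, p ∈ acc → p ∈ (qs.foldl (bfsPush N M frame) (V, acc)).2) ∧
      (∀ p : Int × Int, p ∈ (qs.foldl (bfsPush N M frame) (V, acc)).1 →
         p ∈ V ∨ p ∈ (qs.foldl (bfsPush N M frame) (V, acc)).2) ∧
      ((qs.foldl (bfsPush N M frame) (V, acc)).2.length +
         uz N M frame (fun p => (qs.foldl (bfsPush N M frame) (V, acc)).1.contains p) ≤
       acc.length + uz N M frame (fun p => V.contains p)) := by
  intro qs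
  induction qs with
  | nil =>
    intro V acc
    exact ⟨fun p => by simp, fun p h => Or.inl h, fun p h => h, fun p h => Or.inl h, le_refl _⟩
  | cons q qs ih =>
    intro V acc
    simp only [List.foldl_cons]
    by_cases hc : 0 ≤ q.1 ∧ q.1 < N ∧ 0 ≤ q.2 ∧ q.2 < M ∧ cell frame q.1 q.2 = 0 ∧
        ¬ V.contains q
    · have hpush : bfsPush N M frame (V, acc) q = (V.add q, acc ++ [q]) := by
        rw [bfsPush, if_pos hc]
      rw [hpush]
      obtain ⟨ih1, ih2, ih3, ih4, ih5⟩ := ih (V.add q) (acc ++ [q])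
      have hzq : ZeroC N M frame q :=
        ⟨⟨hc.1, hc.2.1, hc.2.2.1, hc.2.2.2.1⟩, hc.2.2.2.2.1⟩
      have hqV : q ∉ V := fun hm => hc.2.2.2.2.2 ((PySem.Set.contains_iff _ _).mpr hm)
      refine ⟨?_, ?_, ?_, ?_, ?_⟩
      · intro p
        rw [ih1 p, PySem.Set.mem_add]
        constructor
        · rintro ((h | rfl) | ⟨h1, h2⟩)
          · exact Or.inl h
          · exact Or.inr ⟨by simp, hzq⟩
          · exact Or.inr ⟨by simp [h1], h2⟩
        · rintro (h | ⟨h1, h2⟩)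
          · exact Or.inl (Or.inl h)
          · rcases List.mem_cons.mp h1 with rfl | h1'
            · exact Or.inl (Or.inr rfl)
            · exact Or.inr ⟨h1', h2⟩
      · intro p hp
        rcases ih2 p hp with h | ⟨h1, h2⟩
        · rcases List.mem_append.mp h with h' | h'
          · exact Or.inl h'
          · simp only [List.mem_singleton] at h'
            exact Or.inr ⟨by simp [h'], by rw [h']; exact hzq⟩
        · exact Or.inr ⟨by simp [h1], h2⟩
      · intro p hp
        exact ih3 p (List.mem_append.mpr (Or.inl hp))
      · intro p hp
        rcases ih4 p hp with h | h
        · rcases (PySem.Set.mem_add _ _ _).mp h with h' | rfl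
          · exact Or.inl h'
          · exact Or.inr (ih3 p (List.mem_append.mpr (Or.inr (by simp))))
        · exact Or.inr h
      · have hlt : uz N M frame (fun p => (V.add q).contains p) <
            uz N M frame (fun p => V.contains p) := by
          refine uz_lt N M frame _ _ q hzq.1 hzq.2 ?_ ?_ ?_
          · cases h : V.contains q with
            | false => rfl
            | true => exact absurd h hc.2.2.2.2.2
          · exact (PySem.Set.contains_iff _ _).mpr ((PySem.Set.mem_add _ _ _).mpr (Or.inr rfl))
          · intro r _ h
            exact (PySem.Set.contains_iff _ _).mpr
              ((PySem.Set.mem_add _ _ _).mpr (Or.inl ((PySem.Set.contains_iff _ _).mp h)))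
        have : (acc ++ [q]).length = acc.length + 1 := by simp
        omega
    · have hpush : bfsPush N M frame (V, acc) q = (V, acc) := by
        rw [bfsPush, if_neg hc]
      rw [hpush]
      obtain ⟨ih1, ih2, ih3, ih4, ih5⟩ := ih V acc
      refine ⟨?_, ?_, ih3, ih4, ih5⟩
      · intro p
        rw [ih1 p]
        constructor
        · rintro (h | ⟨h1, h2⟩)
          · exact Or.inl h
          · exact Or.inr ⟨by simp [h1], h2⟩
        · rintro (h | ⟨h1, h2⟩)
          · exact Or.inl h
          · rcases List.mem_cons.mp h1 with rfl | h1'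
            · -- the head was skipped: it must already be contained
              have hq : p ∈ V := by
                by_contra hm
                exact hc ⟨h2.1.1, h2.1.2.1, h2.1.2.2.1, h2.1.2.2.2, h2.2,
                  fun hct => hm ((PySem.Set.contains_iff _ _).mp hct)⟩
              exact Or.inl hq
            · exact Or.inr ⟨h1', h2⟩
      · intro p hp
        rcases ih2 p hp with h | ⟨h1, h2⟩
        · exact Or.inl h
        · exact Or.inr ⟨by simp [h1], h2⟩

-- the B-side flood-fill postcondition
def PostB (N M : Int) (frame : List (List Int)) (queue : List (Int × Int))
    (visited R : PySem.Set (Int × Int)) : Prop :=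
  (∀ p : Int × Int, p ∈ visited → p ∈ R) ∧
  (∀ p : Int × Int, p ∈ R → p ∈ visited ∨ ∃ s ∈ queue, Reach N M frame s p) ∧
  (∀ p : Int × Int, p ∈ R → ZeroC N M frame p) ∧
  (∀ p : Int × Int, (p ∈ queue ∨ (p ∈ R ∧ p ∉ visited)) →
     ∀ q : Int × Int, Step N M frame p q → q ∈ R)

theorem bfsB_post (N M : Int) (frame : List (List Int)) :
    ∀ fuel (queue : List (Int × Int)) (visited : PySem.Set (Int × Int)),
      (∀ p ∈ queue, p ∈ visited ∧ ZeroC N M frame p) →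
      (∀ p : Int × Int, p ∈ visited → ZeroC N M frame p) →
      queue.length + uz N M frame (fun p => visited.contains p) < fuel →
      PostB N M frame queue visited (bfsB fuel N M frame queue visited) := by
  intro fuel
  induction fuel with
  | zero => intro queue visited _ _ hf; exact absurd hf (by omega)
  | succ fuel ih =>
    intro queue visited hqueue hsub hf
    match queue with
    | [] =>
      refine ⟨fun p h => h, fun p h => Or.inl h, hsub, ?_⟩
      rintro p (h | ⟨h1, h2⟩) q hq
      · exact absurd h (by simp)
      · exact absurd h1 h2
    | (y, x) :: rest =>
      rw [bfsB_succ]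
      obtain ⟨f1, f2, f3, f4, f5⟩ := bfsPush_fold N M frame (neighborsB y x) visited rest
      set F := (neighborsB y x).foldl (bfsPush N M frame) (visited, rest) with hF
      have hzrest : ∀ p ∈ rest, p ∈ F.1 ∧ ZeroC N M frame p := by
        intro p hp
        have := hqueue p (by simp [hp])
        exact ⟨(f1 p).mpr (Or.inl this.1), this.2⟩
      have hq' : ∀ p ∈ F.2, p ∈ F.1 ∧ ZeroC N M frame p := by
        intro p hp
        rcases f2 p hp with h | ⟨h1, h2⟩
        · exact hzrest p h
        · exact ⟨(f1 p).mpr (Or.inr ⟨h1, h2⟩), h2⟩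
      have hsub' : ∀ p : Int × Int, p ∈ F.1 → ZeroC N M frame p := by
        intro p hp
        rcases (f1 p).mp hp with h | ⟨_, h2⟩
        · exact hsub p h
        · exact h2
      have hm := ih F.2 F.1 hq' hsub' (by
        have : ((y, x) :: rest).length = rest.length + 1 := by simp
        omega)
      obtain ⟨m1, m2, m3, m4⟩ := hm
      set R := bfsB fuel N M frame F.2 F.1 with hR
      have hstephead : ∀ q : Int × Int, Step N M frame (y, x) q → q ∈ F.1 := by
        intro q hq
        exact (f1 q).mpr (Or.inr ⟨hq.1, hq.2⟩)
      refine ⟨?_, ?_, m3, ?_⟩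
      · intro p hp
        exact m1 p ((f1 p).mpr (Or.inl hp))
      · intro p hp
        rcases m2 p hp with h | ⟨s, hs, hreach⟩
        · rcases (f1 p).mp h with h' | ⟨h1, h2⟩
          · exact Or.inl h'
          · exact Or.inr ⟨(y, x), by simp, Relation.ReflTransGen.single ⟨h1, h2⟩⟩
        · rcases f2 s hs with h' | ⟨h1, h2⟩
          · exact Or.inr ⟨s, by simp [h'], hreach⟩
          · exact Or.inr ⟨(y, x), by simp,
              Relation.ReflTransGen.trans (Relation.ReflTransGen.single ⟨h1, h2⟩) hreach⟩
      · rintro p (hp | ⟨hp1, hp2⟩) q hq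
        · rcases List.mem_cons.mp hp with rfl | hp'
          · exact m1 q (hstephead q hq)
          · exact m4 p (Or.inl (f3 p hp')) q hq
        · by_cases hmem : p ∈ F.1
          · rcases f4 p hmem with h | h
            · exact absurd h hp2
            · exact m4 p (Or.inl h) q hq
          · exact m4 p (Or.inr ⟨hp1, hmem⟩) q hq

-- per-cell transition functions (definitionally the loop bodies of the two ports)
def stepA (N M : Int) (frame : List (List Int)) (st : Int × List (List Bool)) (i j : Nat) :
    Int × List (List Bool) :=
  if cell frame (i : Int) (j : Int) = 0 ∧ vget st.2 (i : Int) (j : Int) = false then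
    (st.1 + 1, dfsA (N.toNat * M.toNat + 1) frame ((i : Int), (j : Int)) (vset st.2 (i : Int) (j : Int)))
  else st

def stepB (N M : Int) (frame : List (List Int)) (st : Int × PySem.Set (Int × Int)) (i j : Nat) :
    Int × PySem.Set (Int × Int) :=
  if cell frame (i : Int) (j : Int) = 0 ∧ ¬ st.2.contains ((i : Int), (j : Int)) then
    (st.1 + 1, bfsB (N.toNat * M.toNat + 1) N M frame [((i : Int), (j : Int))] (st.2.add ((i : Int), (j : Int))))
  else st

def visited0 (N M : Int) : List (List Bool) :=
  (List.range N.toNat).map (fun _ => List.replicate M.toNat false)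

theorem solution_eq (N M : Int) (frame : List (List Int)) :
    solution N M frame = ((List.range N.toNat).foldl (fun st i =>
      (List.range M.toNat).foldl (fun st j => stepA N M frame st i j) st)
      (((0 : Int), visited0 N M))).1 := by
  unfold solution stepA visited0; rfl

theorem solution_alt_eq (N M : Int) (frame : List (List Int)) :
    solution_alt N M frame = ((List.range N.toNat).foldl (fun st i =>
      (List.range M.toNat).foldl (fun st j => stepB N M frame st i j) st)
      (((0 : Int), (PySem.Set.empty : PySem.Set (Int × Int))))).1 := by
  unfold solution_alt stepB; rfl

-- the coupling invariant of the two scans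
def ScanInv (N M : Int) (frame : List (List Int))
    (sa : Int × List (List Bool)) (sb : Int × PySem.Set (Int × Int)) : Prop :=
  sa.1 = sb.1 ∧ Dims N M sa.2 ∧
  (∀ p : Int × Int, p ∈ sb.2 → ZeroC N M frame p) ∧
  (∀ p : Int × Int, InB N M p → (vget sa.2 p.1 p.2 = true ↔ p ∈ sb.2)) ∧
  (∀ p q : Int × Int, p ∈ sb.2 → Step N M frame p q → q ∈ sb.2)

theorem scaninv_step (N M : Int) (frame : List (List Int)) (hpre : Pre_solution N M frame)
    (sa : Int × List (List Bool)) (sb : Int × PySem.Set (Int × Int)) (i j : Nat)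
    (hi : i < N.toNat) (hj : j < M.toNat) (h : ScanInv N M frame sa sb) :
    ScanInv N M frame (stepA N M frame sa i j) (stepB N M frame sb i j) := by
  obtain ⟨hcnt, hdims, hsubB, hiff, hclosed⟩ := h
  have hinb0 : InB N M ((i : Int), (j : Int)) := ⟨by simp, by simp; omega, by simp, by simp; omega⟩
  set p0 : Int × Int := ((i : Int), (j : Int)) with hp0
  have hinb : InB N M p0 := hinb0
  by_cases hcell : cell frame p0.1 p0.2 = 0
  · by_cases hvis : p0 ∈ sb.2
    · -- already counted: both branches skip
      have hA : vget sa.2 (i : Int) (j : Int) = true := (hiff p0 hinb).mpr hvis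
      have hvis' : ((i : Int), (j : Int)) ∈ sb.2 := hvis
      rw [stepA, if_neg (by simp [hA]),
        stepB, if_neg (fun hcon => hcon.2 ((PySem.Set.contains_iff _ _).mpr hvis'))]
      exact ⟨hcnt, hdims, hsubB, hiff, hclosed⟩
    · -- a fresh component
      have hz0 : ZeroC N M frame p0 := ⟨hinb, hcell⟩
      have hvA : vget sa.2 p0.1 p0.2 = false := by
        cases hv : vget sa.2 p0.1 p0.2 with
        | false => rfl
        | true => exact absurd ((hiff p0 hinb).mp hv) hvis
      have hB : ¬ sb.2.contains p0 = true := fun hc => hvis ((PySem.Set.contains_iff _ _).mp hc)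
      rw [stepA, if_pos ⟨hcell, hvA⟩, stepB, if_pos ⟨hcell, hB⟩]
      -- A-side flood
      have hsubA : ∀ p : Int × Int, InB N M p → vget (vset sa.2 p0.1 p0.2) p.1 p.2 = true →
          ZeroC N M frame p := by
        intro p hp hm
        rw [vget_vset N M sa.2 p0.1 p0.2 p.1 p.2 hdims hinb hp] at hm
        split at hm
        · next he => have : p = p0 := Prod.ext he.1 he.2; rw [this]; exact hz0
        · exact hsubB p ((hiff p hp).mp hm)
      have hcall := dfsA_post N M frame hpre (N.toNat * M.toNat + 1) p0 (vset sa.2 p0.1 p0.2)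
        ⟨hz0, vget_vset_self N M sa.2 p0.1 p0.2 hdims hinb,
          dims_vset N M sa.2 p0.1 p0.2 hdims, hsubA⟩
        (by have := uz_le N M frame (fun p => vget (vset sa.2 p0.1 p0.2) p.1 p.2); omega)
      obtain ⟨adims, amono, asound, asub, astep, aclosed⟩ := hcall
      set RA := dfsA (N.toNat * M.toNat + 1) frame p0 (vset sa.2 p0.1 p0.2) with hRA
      have hallA : ∀ p : Int × Int, Reach N M frame p0 p →
          vget RA p.1 p.2 = true ∧ InB N M p := by
        intro p h
        induction h with
        | refl =>
          exact ⟨amono p0 hinb (vget_vset_self N M sa.2 p0.1 p0.2 hdims hinb), hinb⟩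
        | @tail b c hreach hstep ihm =>
          obtain ⟨mkb, inbb⟩ := ihm
          refine ⟨?_, hstep.2.1⟩
          cases hb : vget (vset sa.2 p0.1 p0.2) b.1 b.2 with
          | true =>
            rw [vget_vset N M sa.2 p0.1 p0.2 b.1 b.2 hdims hinb inbb] at hb
            split at hb
            · next he =>
              have hbp : b = p0 := Prod.ext he.1 he.2
              exact astep c (hbp ▸ hstep)
            · have hcmem : c ∈ sb.2 := hclosed b c ((hiff b inbb).mp hb) hstep
              exact amono c hstep.2.1 (vget_vset_mono N M sa.2 p0.1 p0.2 c.1 c.2 hdims hinb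
                hstep.2.1 ((hiff c hstep.2.1).mpr hcmem))
          | false => exact aclosed b inbb mkb hb c hstep
      have charA : ∀ p : Int × Int, InB N M p →
          (vget RA p.1 p.2 = true ↔ (p ∈ sb.2 ∨ Reach N M frame p0 p)) := by
        intro p hp
        constructor
        · intro hm
          rcases asound p hp hm with h | h
          · rw [vget_vset N M sa.2 p0.1 p0.2 p.1 p.2 hdims hinb hp] at h
            split at h
            · next he =>
              have : p = p0 := Prod.ext he.1 he.2
              exact Or.inr (this ▸ Relation.ReflTransGen.refl)
            · exact Or.inl ((hiff p hp).mp h)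
          · exact Or.inr h
        · rintro (h | h)
          · exact amono p hp (vget_vset_mono N M sa.2 p0.1 p0.2 p.1 p.2 hdims hinb hp
              ((hiff p hp).mpr h))
          · exact (hallA p h).1
      -- B-side flood
      have hsubB' : ∀ p : Int × Int, p ∈ sb.2.add p0 → ZeroC N M frame p := by
        intro p hp
        rcases (PySem.Set.mem_add _ _ _).mp hp with h | rfl
        · exact hsubB p h
        · exact hz0
      have hcallB := bfsB_post N M frame (N.toNat * M.toNat + 1) [p0] (sb.2.add p0)
        (by
          intro p hp
          simp only [List.mem_singleton] at hp
          subst hp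
          exact ⟨(PySem.Set.mem_add _ _ _).mpr (Or.inr rfl), hz0⟩)
        hsubB'
        (by
          have h1 : uz N M frame (fun p => (sb.2.add p0).contains p) <
              uz N M frame (fun p => sb.2.contains p) := by
            refine uz_lt N M frame _ _ p0 hinb hcell ?_ ?_ ?_
            · cases hv : sb.2.contains p0 with
              | false => rfl
              | true => exact absurd hv hB
            · exact (PySem.Set.contains_iff _ _).mpr ((PySem.Set.mem_add _ _ _).mpr (Or.inr rfl))
            · intro r _ hr
              exact (PySem.Set.contains_iff _ _).mpr
                ((PySem.Set.mem_add _ _ _).mpr (Or.inl ((PySem.Set.contains_iff _ _).mp hr)))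
          have h2 := uz_le N M frame (fun p => sb.2.contains p)
          simp only [List.length_singleton]
          omega)
      obtain ⟨bm1, bm2, bm3, bm4⟩ := hcallB
      set RB := bfsB (N.toNat * M.toNat + 1) N M frame [p0] (sb.2.add p0) with hRB
      have hallB : ∀ p : Int × Int, Reach N M frame p0 p → p ∈ RB := by
        intro p h
        induction h with
        | refl => exact bm1 p0 ((PySem.Set.mem_add _ _ _).mpr (Or.inr rfl))
        | @tail b c hreach hstep ihm =>
          by_cases hb : b ∈ sb.2
          · exact bm1 c ((PySem.Set.mem_add _ _ _).mpr (Or.inl (hclosed b c hb hstep)))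
          · by_cases hbp : b = p0
            · exact bm4 b (Or.inl (by simp [hbp])) c hstep
            · have hbadd : b ∉ sb.2.add p0 := by
                intro hm
                rcases (PySem.Set.mem_add _ _ _).mp hm with h' | h'
                · exact hb h'
                · exact hbp h'
              exact bm4 b (Or.inr ⟨ihm, hbadd⟩) c hstep
      have charB : ∀ p : Int × Int, p ∈ RB ↔ (p ∈ sb.2 ∨ Reach N M frame p0 p) := by
        intro p
        constructor
        · intro hm
          rcases bm2 p hm with h | ⟨s, hs, hreach⟩
          · rcases (PySem.Set.mem_add _ _ _).mp h with h' | rfl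
            · exact Or.inl h'
            · exact Or.inr Relation.ReflTransGen.refl
          · simp only [List.mem_singleton] at hs
            subst hs
            exact Or.inr hreach
        · rintro (h | h)
          · exact bm1 p ((PySem.Set.mem_add _ _ _).mpr (Or.inl h))
          · exact hallB p h
      -- assemble the new invariant
      refine ⟨by simp [hcnt], adims, bm3, ?_, ?_⟩
      · intro p hp
        rw [charA p hp, charB p]
      · intro p q hp hstep
        rcases (charB p).mp hp with h | h
        · exact (charB q).mpr (Or.inl (hclosed p q h hstep))
        · exact (charB q).mpr (Or.inr (Relation.ReflTransGen.tail h hstep))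
  · -- not a zero cell: both branches skip
    have hcell' : ¬ cell frame (i : Int) (j : Int) = 0 := hcell
    rw [stepA, if_neg (by simp [hcell']), stepB, if_neg (by simp [hcell'])]
    exact ⟨hcnt, hdims, hsubB, hiff, hclosed⟩

theorem vget_visited0 (N M : Int) (y x : Int) : vget (visited0 N M) y x = false := by
  rw [vget]
  rcases Nat.lt_or_ge y.toNat N.toNat with h | h
  · have hlen : y.toNat < (visited0 N M).length := by simp [visited0]; omega
    rw [List.getD_eq_getElem _ [] hlen]
    simp only [visited0, List.getElem_map]
    rw [List.getD_eq_getElem?_getD, List.getElem?_replicate]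
    split <;> rfl
  · have hlen : (visited0 N M).length ≤ y.toNat := by simp [visited0]; omega
    rw [List.getD_eq_default _ _ hlen]
    rfl

theorem scaninv_init (N M : Int) (frame : List (List Int)) :
    ScanInv N M frame (((0 : Int), visited0 N M)) (((0 : Int), (PySem.Set.empty : PySem.Set (Int × Int)))) := by
  refine ⟨rfl, ⟨by simp [visited0], ?_⟩, ?_, ?_, ?_⟩
  · intro r hr
    simp only [visited0, List.mem_map] at hr
    obtain ⟨_, _, rfl⟩ := hr
    simp
  · intro p hp
    exact absurd hp (by simp [PySem.Set.empty])
  · intro p _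
    rw [vget_visited0]
    simp [PySem.Set.empty]
  · intro p q hp _
    exact absurd hp (by simp [PySem.Set.empty])

-- ===== VERDICT (by name: the statement is the Claim_ definition above) =====
theorem solution_spec : Claim_equal_solution := by
  intro N M frame _ hpre
  unfold Spec_solution
  rw [solution_eq, solution_alt_eq]
  have main : ∀ (is : List Nat) (sa : Int × List (List Bool)) (sb : Int × PySem.Set (Int × Int)),
      (∀ i ∈ is, i < N.toNat) → ScanInv N M frame sa sb →
      ScanInv N M frame
        (is.foldl (fun st i => (List.range M.toNat).foldl (fun st j => stepA N M frame st i j) st) sa)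
        (is.foldl (fun st i => (List.range M.toNat).foldl (fun st j => stepB N M frame st i j) st) sb) := by
    intro is
    induction is with
    | nil => intro sa sb _ h; exact h
    | cons i is ih =>
      intro sa sb hlt h
      simp only [List.foldl_cons]
      refine ih _ _ (fun k hk => hlt k (by simp [hk])) ?_
      have hi : i < N.toNat := hlt i (by simp)
      have inner : ∀ (js : List Nat) (sa : Int × List (List Bool)) (sb : Int × PySem.Set (Int × Int)),
          (∀ j ∈ js, j < M.toNat) → ScanInv N M frame sa sb →
          ScanInv N M frame (js.foldl (fun st j => stepA N M frame st i j) sa)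
            (js.foldl (fun st j => stepB N M frame st i j) sb) := by
        intro js
        induction js with
        | nil => intro sa sb _ h; exact h
        | cons j js ihj =>
          intro sa sb hlt h
          simp only [List.foldl_cons]
          exact ihj _ _ (fun k hk => hlt k (by simp [hk]))
            (scaninv_step N M frame hpre sa sb i j hi (hlt j (by simp)) h)
      exact inner _ _ _ (fun j hj => List.mem_range.mp hj) h
  have := main (List.range N.toNat) _ _ (fun i hi => List.mem_range.mp hi)
    (scaninv_init N M frame)
  exact this.1
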